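-- pv_equiv track=rewrite | github.com/thunlp/TopJudge | counter.py | check
-- ===== SOURCE A (Python) =====
-- def check(data):
--     if len(data["meta"]["crit"]) != 1:
--         return False
--     cnt = 0
--
--     arr = []
--     for x, y, z in data["meta"]["law"]:
--         if x < 102 or x > 452:
--             continue
--         arr.append((x, y))
--
--     arr = list(set(arr))
--     arr.sort()
--
--     return len(arr) == 1
-- ===== SOURCE B (Python) =====
-- def check(data):
--     if len(data["meta"]["crit"]) != 1:
--         return False
--     first = None
--     seen = False
--     for x, y, z in data["meta"]["law"]:
--         if x < 102 or x > 452: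
--             continue
--         if not seen:
--             first = (x, y)
--             seen = True
--         elif (x, y) != first:
--             return False
--     return seen
-- ===== Notes on version B (the rewrite author's own statement) =====
-- stated objective: simpler
-- what changed: Replaces A's append-filter-then-set-dedup-then-sort-then-count pipeline by a single early-exit pass that records the first surviving (x,y) pair and returns False on the first mismatch.
import Mathlib
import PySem

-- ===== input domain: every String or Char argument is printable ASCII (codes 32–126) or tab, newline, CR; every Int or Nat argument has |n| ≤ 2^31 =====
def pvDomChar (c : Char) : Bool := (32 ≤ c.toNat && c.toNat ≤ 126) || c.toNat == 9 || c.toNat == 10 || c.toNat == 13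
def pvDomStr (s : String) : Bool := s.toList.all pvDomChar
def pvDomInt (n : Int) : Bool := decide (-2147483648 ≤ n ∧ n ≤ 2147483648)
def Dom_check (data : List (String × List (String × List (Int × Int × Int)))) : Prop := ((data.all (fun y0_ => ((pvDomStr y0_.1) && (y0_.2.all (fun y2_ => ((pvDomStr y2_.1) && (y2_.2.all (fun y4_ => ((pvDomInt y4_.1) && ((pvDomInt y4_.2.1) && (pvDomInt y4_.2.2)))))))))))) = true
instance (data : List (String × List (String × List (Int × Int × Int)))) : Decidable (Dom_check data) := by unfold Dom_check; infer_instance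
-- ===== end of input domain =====

-- B drops A's set+sort pipeline for a single early-exit pass keeping the first filtered pair (objective: simpler).

-- ===== PORT A =====
-- d[k] on the assoc list representing the dict: first match
def dictGetA? {α : Type} (d : List (String × α)) (k : String) : Option α := List.lookup k d
-- the loop's skip test 'x < 102 or x > 452'
def outsideA (t : Int × Int × Int) : Bool := decide (t.1 < 102) || decide (452 < t.1)

def check (data : List (String × List (String × List (Int × Int × Int)))) : Bool :=
  match dictGetA? data "meta" with
  | none => false
  | some m =>
    match dictGetA? m "crit", dictGetA? m "law" with
    | some crit, some law =>
      if crit.length ≠ 1 then false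
      else
        -- for x, y, z in law: if x < 102 or x > 452: continue; arr.append((x, y))
        let arr := law.foldl (fun acc t => if outsideA t then acc else acc ++ [(t.1, t.2.1)]) ([] : List (Int × Int))
        -- arr = list(set(arr)); arr.sort()
        let arr2 := PySem.Set.ofList arr
        let arr3 := PySem.List.sorted2 arr2 Prod.fst Prod.snd false
        decide (arr3.length = 1)
    | _, _ => false

-- ===== PORT B =====
def dictGetB? {α : Type} (d : List (String × α)) (k : String) : Option α := List.lookup k d
def outsideB (t : Int × Int × Int) : Bool := decide (t.1 < 102) || decide (452 < t.1)

-- loop state: first (the recorded pair, none = not seen); early return False on a mismatch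
def checkAltGo (first : Option (Int × Int)) (l : List (Int × Int × Int)) : Bool :=
  match l with
  | [] => first.isSome
  | t :: rest =>
    if outsideB t then checkAltGo first rest
    else
      match first with
      | none => checkAltGo (some (t.1, t.2.1)) rest
      | some f => if (t.1, t.2.1) == f then checkAltGo (some f) rest else false

def check_alt (data : List (String × List (String × List (Int × Int × Int)))) : Bool :=
  match dictGetB? data "meta" with
  | none => false
  | some m =>
    match dictGetB? m "crit" with
    | none => false
    | some crit =>
      if crit.length ≠ 1 then false
      else
        match dictGetB? m "law" with
        | none => false
        | some law => checkAltGo none law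

-- ===== PRECONDITION & SPEC =====
-- Pre_ excludes exactly the inputs where the Python raises KeyError: missing "meta" or "crit" key,
-- or a missing "law" key when the crit guard passes (with len(crit) != 1 A returns before touching "law").
def Pre_check (data : List (String × List (String × List (Int × Int × Int)))) : Prop :=
  (List.lookup "meta" data).isSome ∧
  (List.lookup "crit" ((List.lookup "meta" data).getD [])).isSome ∧
  (((List.lookup "crit" ((List.lookup "meta" data).getD [])).getD []).length = 1 →
    (List.lookup "law" ((List.lookup "meta" data).getD [])).isSome)
instance (data : List (String × List (String × List (Int × Int × Int)))) : Decidable (Pre_check data) := by unfold Pre_check; infer_instance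
def pvWitness_check : (List (String × List (String × List (Int × Int × Int)))) :=
  [("meta", [("crit", [(1, 2, 3)]), ("law", [(150, 4, 5), (150, 4, 6)])])]
def Spec_check (data : List (String × List (String × List (Int × Int × Int)))) (out : Bool) : Prop := out = check_alt data
instance (data : List (String × List (String × List (Int × Int × Int)))) (out : Bool) : Decidable (Spec_check data out) := by unfold Spec_check; infer_instance

-- ===== CLAIM (what is proved, stated in full; the proofs are below) =====
def Claim_equal_check : Prop := ∀ (data : List (String × List (String × List (Int × Int × Int)))), Dom_check data → Pre_check data → Spec_check data (check data)

-- ===== LEMMAS AND PROOFS =====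

-- the two ports' helper copies are the same functions
lemma getA_eq : @dictGetA? = fun {α} (d : List (String × α)) k => List.lookup k d := rfl
lemma getB_eq : @dictGetB? = fun {α} (d : List (String × α)) k => List.lookup k d := rfl
lemma outB_eq : outsideB = outsideA := rfl

-- the filtered-append loop of A is filter-then-map
lemma arr_eq (l : List (Int × Int × Int)) (acc : List (Int × Int)) :
    l.foldl (fun acc t => if outsideA t then acc else acc ++ [(t.1, t.2.1)]) acc
      = acc ++ (l.filter (fun t => !outsideA t)).map (fun t => (t.1, t.2.1)) := by
  induction l generalizing acc with
  | nil => simp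
  | cons t rest ih =>
    by_cases h : outsideA t = true <;>
      simp [h, ih]

-- once a pair is recorded, the loop just checks every later kept pair equals it
lemma go_some (l : List (Int × Int × Int)) (f : Int × Int) :
    checkAltGo (some f) l = l.all (fun t => outsideA t || ((t.1, t.2.1) == f)) := by
  induction l with
  | nil => rfl
  | cons t rest ih =>
    simp only [checkAltGo, List.all_cons, outB_eq]
    by_cases h : outsideA t = true
    · simp [h, ih]
    · by_cases he : ((t.1, t.2.1) == f) = true
      · simp [h, he, ih]
      · simp [h, he]

lemma foldl_add_len_le (l : List (Int × Int)) (s : List (Int × Int)) :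
    s.length ≤ (l.foldl PySem.Set.add s).length := by
  induction l generalizing s with
  | nil => simp
  | cons p rest ih =>
    refine le_trans ?_ (ih (PySem.Set.add s p))
    unfold PySem.Set.add
    split <;> simp

-- dedup of a nonempty list has one element iff all elements equal the first
lemma len1 (l : List (Int × Int)) (f : Int × Int) :
    ((l.foldl PySem.Set.add [f]).length = 1) ↔ (l.all (fun p => p == f) = true) := by
  induction l with
  | nil => simp
  | cons p rest ih =>
    simp only [List.foldl_cons, List.all_cons]
    by_cases he : (p == f) = true
    · have hp : p = f := beq_iff_eq.mp he
      have hadd : PySem.Set.add [f] p = [f] := by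
        subst hp; unfold PySem.Set.add; simp [PySem.Set.contains]
      rw [hadd]
      simp [he, ih]
    · have hpf : ¬ p = f := fun h => he (beq_iff_eq.mpr h)
      have hadd : PySem.Set.add [f] p = [f, p] := by
        unfold PySem.Set.add
        simp [PySem.Set.contains, hpf]
      rw [hadd]
      have h2 := foldl_add_len_le rest [f, p]
      simp only [List.length_cons, List.length_nil] at h2
      constructor
      · intro h; omega
      · intro h; simp [he] at h

lemma all_filter_map (l : List (Int × Int × Int)) (f : Int × Int) :
    ((l.filter (fun t => !outsideA t)).map (fun t => (t.1, t.2.1))).all (fun p => p == f)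
      = l.all (fun t => outsideA t || ((t.1, t.2.1) == f)) := by
  induction l with
  | nil => rfl
  | cons t rest ih =>
    by_cases h : outsideA t = true <;>
      simp [h, ih]

-- the core: A's set/sort count equals B's one-pass loop, for any law list
lemma core (law : List (Int × Int × Int)) :
    decide ((PySem.List.sorted2 (PySem.Set.ofList
        (law.foldl (fun acc t => if outsideA t then acc else acc ++ [(t.1, t.2.1)]) ([] : List (Int × Int))))
        Prod.fst Prod.snd false).length = 1)
      = checkAltGo none law := by
  have hlen : ∀ s : List (Int × Int),
      (PySem.List.sorted2 s Prod.fst Prod.snd false).length = s.length := by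
    intro s; exact (PySem.List.sorted2_perm s Prod.fst Prod.snd false).length_eq
  rw [arr_eq, hlen, List.nil_append]
  induction law with
  | nil => simp [checkAltGo, PySem.Set.ofList]
  | cons t rest ih =>
    by_cases h : outsideA t = true
    · simpa [List.filter_cons, h, checkAltGo, outB_eq] using ih
    · simp only [List.filter_cons, h, Bool.not_false, if_pos, List.map_cons, checkAltGo,
        Bool.false_eq_true, outB_eq]
      have hof : PySem.Set.ofList ((t.1, t.2.1) ::
          (rest.filter (fun t => !outsideA t)).map (fun t => (t.1, t.2.1)))
          = ((rest.filter (fun t => !outsideA t)).map (fun t => (t.1, t.2.1))).foldl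
              PySem.Set.add [(t.1, t.2.1)] := by
        rw [PySem.Set.ofList_eq_foldl]
        simp [PySem.Set.add, PySem.Set.contains]
      rw [hof, go_some, ← all_filter_map rest (t.1, t.2.1)]
      by_cases hall : (((rest.filter (fun t => !outsideA t)).map (fun t => (t.1, t.2.1))).all (fun p => p == (t.1, t.2.1))) = true
      · simp [hall, (len1 _ _).mpr hall]
      · have hne : ¬ ((((rest.filter (fun t => !outsideA t)).map (fun t => (t.1, t.2.1))).foldl PySem.Set.add [(t.1, t.2.1)]).length = 1) :=
          fun hc => hall ((len1 _ _).mp hc)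
        simp [hall, hne]

-- ===== VERDICT (by name: the statement is the Claim_ definition above) =====
theorem check_spec : Claim_equal_check := by
  intro data _ hpre
  unfold Spec_check check check_alt
  obtain ⟨hm, hc, hl⟩ := hpre
  simp only [getA_eq, getB_eq]
  cases hmeta : List.lookup "meta" data with
  | none => simp [hmeta] at hm
  | some m =>
    rw [hmeta] at hc hl
    simp only [Option.getD_some] at hc hl
    cases hcrit : List.lookup "crit" m with
    | none => simp [hcrit] at hc
    | some crit =>
      rw [hcrit] at hl
      simp only [Option.getD_some] at hl
      by_cases h1 : crit.length ≠ 1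
      · cases hlaw : List.lookup "law" m <;> simp [hcrit, hlaw, h1]
      · have hlaw' := hl (by omega)
        cases hlaw : List.lookup "law" m with
        | none => simp [hlaw] at hlaw'
        | some law =>
          simp only [hcrit, hlaw, if_neg h1]
          exact core law
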